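-- pv_equiv track=rewrite | github.com/Sjeongheon/stair-recognition | detect_contours.py | filter_edges_by_depth
-- ===== SOURCE A (Python) =====
-- def filter_edges_by_depth(image_lines, depth_lines, tolerance=10):
--     filtered_lines = []
--     for img_line in image_lines:
--         for dpt_line in depth_lines:
--             if abs(img_line[1] - dpt_line[1]) < tolerance:
--                 filtered_lines.append(img_line)
--                 break
--     return filtered_lines
-- ===== SOURCE B (Python) =====
-- def filter_edges_by_depth(image_lines, depth_lines, tolerance=10):
--     ys = sorted(d[1] for d in depth_lines)
--     n = len(ys)
--
--     def near(y):
--         lo, hi = 0, n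
--         while lo < hi:
--             mid = (lo + hi) // 2
--             if ys[mid] < y:
--                 lo = mid + 1
--             else:
--                 hi = mid
--         return (lo < n and ys[lo] - y < tolerance) or \
--                (lo > 0 and y - ys[lo - 1] < tolerance)
--
--     return [line for line in image_lines if near(line[1])]
-- ===== Notes on version B (the rewrite author's own statement) =====
-- stated objective: alternative
-- what changed: Instead of a nested scan of all depth lines per image line, B sorts the depth y-values once and binary-searches the nearest neighbour of each image line's y to test the tolerance.
-- outside the precondition, e.g. on filter_edges_by_depth([[5]], [], 10): A returns [], B raises IndexError
import Mathlib
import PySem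

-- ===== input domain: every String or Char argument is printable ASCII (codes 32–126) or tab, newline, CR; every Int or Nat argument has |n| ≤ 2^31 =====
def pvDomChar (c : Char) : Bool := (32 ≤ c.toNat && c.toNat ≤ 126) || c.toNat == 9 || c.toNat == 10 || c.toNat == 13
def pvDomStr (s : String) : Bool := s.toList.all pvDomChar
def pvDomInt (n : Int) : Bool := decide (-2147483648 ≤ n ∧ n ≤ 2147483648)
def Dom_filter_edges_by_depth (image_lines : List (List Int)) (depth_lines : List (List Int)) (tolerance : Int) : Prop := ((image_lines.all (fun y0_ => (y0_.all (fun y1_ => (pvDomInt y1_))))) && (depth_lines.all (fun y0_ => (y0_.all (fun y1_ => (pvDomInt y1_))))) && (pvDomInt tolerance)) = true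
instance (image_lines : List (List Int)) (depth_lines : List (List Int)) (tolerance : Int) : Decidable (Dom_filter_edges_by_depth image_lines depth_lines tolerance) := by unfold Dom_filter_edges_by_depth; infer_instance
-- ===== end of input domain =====

-- B replaces A's nested scan of all depth lines per image line by one sort of the
-- depth y-values plus a binary search of the nearest neighbour per image line (objective: alternative algorithm).

-- ===== PORT A =====
-- line[1] (IndexError = none is excluded by Pre_; the default 0 is never used inside Pre_)
def pvY (l : List Int) : Int := (PySem.List.pyGet? l 1).getD 0

-- the inner 'for dpt_line in depth_lines: … break' loop of A
def pvAnyNear (img_y tol : Int) : List (List Int) → Bool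
  | [] => false
  | d :: rest => if |img_y - pvY d| < tol then true else pvAnyNear img_y tol rest

def filter_edges_by_depth (image_lines : List (List Int)) (depth_lines : List (List Int)) (tolerance : Int) : List (List Int) :=
  image_lines.foldl (fun acc img => if pvAnyNear (pvY img) tolerance depth_lines then acc ++ [img] else acc) []

-- ===== PORT B =====
-- the hand-written 'while lo < hi' binary search of Source B (bisect_left)
def pvBisect (ys : List Int) (y : Int) (lo hi : Nat) : Nat :=
  if lo < hi then
    let mid := (lo + hi) / 2
    if ys.getD mid 0 < y then pvBisect ys y (mid + 1) hi else pvBisect ys y lo mid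
  else lo
termination_by hi - lo
decreasing_by all_goals omega

-- Source B's 'near(y)'
def pvNear (ys : List Int) (tol y : Int) : Bool :=
  let n := ys.length
  let i := pvBisect ys y 0 n
  (decide (i < n) && decide (ys.getD i 0 - y < tol)) ||
  (decide (0 < i) && decide (y - ys.getD (i - 1) 0 < tol))

def filter_edges_by_depth_alt (image_lines : List (List Int)) (depth_lines : List (List Int)) (tolerance : Int) : List (List Int) :=
  let ys := PySem.List.sorted (depth_lines.map (fun d => pvY d)) (fun x => x) false
  image_lines.filter (fun line => pvNear ys tolerance (pvY line))

-- ===== PRECONDITION & SPEC =====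
-- Pre_ excludes lines of length < 2, on which the Python programs raise IndexError when the
-- line is reached (A returns only in the degenerate case where a short line is never indexed,
-- e.g. a short image line with depth_lines = [], where B still raises).
def Pre_filter_edges_by_depth (image_lines : List (List Int)) (depth_lines : List (List Int)) (tolerance : Int) : Prop :=
  (∀ l ∈ image_lines, 2 ≤ l.length) ∧ (∀ d ∈ depth_lines, 2 ≤ d.length)
instance (image_lines : List (List Int)) (depth_lines : List (List Int)) (tolerance : Int) : Decidable (Pre_filter_edges_by_depth image_lines depth_lines tolerance) := by unfold Pre_filter_edges_by_depth; infer_instance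

def pvWitness_filter_edges_by_depth : List (List Int) × List (List Int) × Int := ([[0, 5]], [[1, 7]], 10)

def Spec_filter_edges_by_depth (image_lines : List (List Int)) (depth_lines : List (List Int)) (tolerance : Int) (out : List (List Int)) : Prop := out = filter_edges_by_depth_alt image_lines depth_lines tolerance
instance (image_lines : List (List Int)) (depth_lines : List (List Int)) (tolerance : Int) (out : List (List Int)) : Decidable (Spec_filter_edges_by_depth image_lines depth_lines tolerance out) := by unfold Spec_filter_edges_by_depth; infer_instance

-- ===== CLAIM (what is proved, stated in full; the proofs are below) =====
def Claim_equal_filter_edges_by_depth : Prop := ∀ (image_lines : List (List Int)) (depth_lines : List (List Int)) (tolerance : Int), Dom_filter_edges_by_depth image_lines depth_lines tolerance → Pre_filter_edges_by_depth image_lines depth_lines tolerance → Spec_filter_edges_by_depth image_lines depth_lines tolerance (filter_edges_by_depth image_lines depth_lines tolerance)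

-- ===== LEMMAS AND PROOFS =====

-- A's inner loop is an existence test over depth_lines
theorem pvAnyNear_eq_true_iff (y tol : Int) (depth : List (List Int)) :
    pvAnyNear y tol depth = true ↔ ∃ d ∈ depth, |y - pvY d| < tol := by
  induction depth with
  | nil => simp [pvAnyNear]
  | cons d rest ih =>
    simp only [pvAnyNear]
    split_ifs with h
    · simp [h]
    · simp [ih, h]

-- the binary search's invariant/specification
theorem pvBisect_spec (ys : List Int) (y : Int)
    (hs : ∀ p q : Nat, p ≤ q → q < ys.length → ys.getD p 0 ≤ ys.getD q 0) :
    ∀ fuel lo hi : Nat, hi - lo ≤ fuel → lo ≤ hi → hi ≤ ys.length →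
      (∀ j, j < lo → ys.getD j 0 < y) →
      (∀ j, hi ≤ j → j < ys.length → y ≤ ys.getD j 0) →
      lo ≤ pvBisect ys y lo hi ∧ pvBisect ys y lo hi ≤ hi ∧
      (∀ j, j < pvBisect ys y lo hi → ys.getD j 0 < y) ∧
      (∀ j, pvBisect ys y lo hi ≤ j → j < ys.length → y ≤ ys.getD j 0) := by
  intro fuel
  induction fuel with
  | zero =>
    intro lo hi hf hlh hhn hlow hhigh
    have : lo = hi := by omega
    subst this
    rw [pvBisect]
    simp only [lt_irrefl, if_false]
    exact ⟨le_refl _, le_refl _, hlow, hhigh⟩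
  | succ k ih =>
    intro lo hi hf hlh hhn hlow hhigh
    rw [pvBisect]
    by_cases h : lo < hi
    · simp only [h, if_true]
      set mid := (lo + hi) / 2 with hmid
      have hm1 : lo ≤ mid := by omega
      have hm2 : mid < hi := by omega
      by_cases hc : ys.getD mid 0 < y
      · simp only [hc, if_true]
        refine (ih (mid + 1) hi (by omega) (by omega) hhn ?_ hhigh).imp (by omega) id
        intro j hj
        rcases lt_or_ge j lo with hjl | hjl
        · exact hlow j hjl
        · exact lt_of_le_of_lt (hs j mid (by omega) (by omega)) hc
      · simp only [hc, if_false]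
        refine (ih lo mid (by omega) (by omega) (by omega) hlow ?_).imp id
            (fun h2 => ⟨by omega, h2.2⟩)
        intro j hj hjn
        exact le_trans (le_of_not_gt hc) (hs mid j hj hjn)
    · simp only [h, if_false]
      have : lo = hi := by omega
      subst this
      exact ⟨le_refl _, le_refl _, hlow, hhigh⟩

-- Source B's near(y) is the same existence test, on a ≤-sorted list
theorem pvNear_eq_true_iff (ys : List Int) (tol y : Int)
    (hs : ∀ p q : Nat, p ≤ q → q < ys.length → ys.getD p 0 ≤ ys.getD q 0) :
    pvNear ys tol y = true ↔ ∃ v ∈ ys, |y - v| < tol := by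
  have H := pvBisect_spec ys y hs ys.length 0 ys.length (by omega) (by omega) (le_refl _)
      (by omega) (by omega)
  obtain ⟨-, hile, hlt, hge⟩ := H
  set i := pvBisect ys y 0 ys.length with hi
  simp only [pvNear, ← hi, Bool.or_eq_true, Bool.and_eq_true, decide_eq_true_eq]
  constructor
  · rintro (⟨hin, hd⟩ | ⟨hipos, hd⟩)
    · refine ⟨ys.getD i 0, ?_, ?_⟩
      · rw [List.getD_eq_getElem ys 0 hin]; exact List.getElem_mem hin
      · have := hge i (le_refl _) hin
        rw [abs_sub_lt_iff]; omega
    · have hin : i - 1 < ys.length := by omega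
      refine ⟨ys.getD (i - 1) 0, ?_, ?_⟩
      · rw [List.getD_eq_getElem ys 0 hin]; exact List.getElem_mem hin
      · have := hlt (i - 1) (by omega)
        rw [abs_sub_lt_iff]; omega
  · rintro ⟨v, hv, habs⟩
    rw [abs_sub_lt_iff] at habs
    obtain ⟨k, hk, hkv⟩ := List.mem_iff_getElem.mp hv
    have hkd : ys.getD k 0 = v := by rw [List.getD_eq_getElem ys 0 hk, hkv]
    by_cases hyv : y ≤ v
    · left
      have hki : i ≤ k := by
        by_contra hki
        exact absurd (hkd ▸ hlt k (by omega)) (by omega)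
      have hin : i < ys.length := by omega
      have h1 := hs i k hki hk
      have h2 := hge i (le_refl _) hin
      exact ⟨hin, by omega⟩
    · right
      have hyv' : v < y := by omega
      have hki : k < i := by
        by_contra hki
        exact absurd (hkd ▸ hge k (by omega) hk) (by omega)
      have h1 := hs k (i - 1) (by omega) (by omega)
      have h2 := hlt (i - 1) (by omega)
      exact ⟨by omega, by omega⟩

-- the sorted depth y-list is pointwise monotone under getD
theorem sorted_getD_mono (xs : List Int) :
    ∀ p q : Nat, p ≤ q → q < (PySem.List.sorted xs (fun x => x) false).length →
      (PySem.List.sorted xs (fun x => x) false).getD p 0 ≤ (PySem.List.sorted xs (fun x => x) false).getD q 0 := by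
  intro p q hpq hq
  have hp : p < (PySem.List.sorted xs (fun x => x) false).length := by omega
  rw [List.getD_eq_getElem _ 0 hp, List.getD_eq_getElem _ 0 hq]
  exact PySem.List.key_sorted_getElem_mono xs (fun x => x) hpq hq

-- the two per-line predicates agree
theorem pred_eq (depth : List (List Int)) (tol y : Int) :
    pvNear (PySem.List.sorted (depth.map (fun d => pvY d)) (fun x => x) false) tol y
      = pvAnyNear y tol depth := by
  set ys := PySem.List.sorted (depth.map (fun d => pvY d)) (fun x => x) false with hys
  have h1 := pvNear_eq_true_iff ys tol y (sorted_getD_mono _)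
  have h2 := pvAnyNear_eq_true_iff y tol depth
  have hmem : ∀ v, v ∈ ys ↔ v ∈ depth.map (fun d => pvY d) := by
    intro v; rw [hys, PySem.List.mem_sorted]
  cases ha : pvAnyNear y tol depth with
  | true =>
    rw [h1, hys]
    obtain ⟨d, hd, hlt⟩ := h2.mp ha
    exact ⟨pvY d, (hmem (pvY d)).mpr (List.mem_map_of_mem hd), hlt⟩
  | false =>
    rw [Bool.eq_false_iff, Ne, h1]
    rintro ⟨v, hv, hlt⟩
    obtain ⟨d, hd, rfl⟩ := List.mem_map.mp ((hmem v).mp hv)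
    rw [Bool.eq_false_iff, Ne, h2] at ha
    exact ha ⟨d, hd, hlt⟩

-- ===== VERDICT (by name: the statement is the Claim_ definition above) =====
theorem filter_edges_by_depth_spec : Claim_equal_filter_edges_by_depth := by
  intro image_lines depth_lines tolerance _ _
  unfold Spec_filter_edges_by_depth filter_edges_by_depth filter_edges_by_depth_alt
  rw [PySem.List.foldl_append_if_eq_filter]
  simp only [List.nil_append]
  exact List.filter_congr (fun line _ => (pred_eq depth_lines tolerance (pvY line)).symm)
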